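-- pv_equiv track=rewrite | github.com/BryanEspana/lab8-teoria | parte3.py | function
-- ===== SOURCE A (Python) =====
-- def function(n):
--     counter = 0
--     for i in range(n//2, n + 1):
--         for j in range(1, n - n//2 + 1):
--             k = 1
--             while k <= n:
--                 counter += 1
--                 k *= 2
--     return counter
-- ===== SOURCE B (Python) =====
-- def function(n):
--     # Closed form: the loop body runs (#outer)*(#inner) times, each adding
--     # bit_length(n) (number of powers of 2 that are <= n); zero when n <= 0.
--     if n <= 0:
--         return 0
--     h = (n + 1) // 2          # inner range length; outer length is h + 1
--     return (h + 1) * h * n.bit_length()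
-- ===== Notes on version B (the rewrite author's own statement) =====
-- stated objective: faster
-- what changed: Replaced the three nested loops by a closed-form product (n+1-n//2)*(n-n//2)*n.bit_length(), returning 0 for n<=0.
import Mathlib
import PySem

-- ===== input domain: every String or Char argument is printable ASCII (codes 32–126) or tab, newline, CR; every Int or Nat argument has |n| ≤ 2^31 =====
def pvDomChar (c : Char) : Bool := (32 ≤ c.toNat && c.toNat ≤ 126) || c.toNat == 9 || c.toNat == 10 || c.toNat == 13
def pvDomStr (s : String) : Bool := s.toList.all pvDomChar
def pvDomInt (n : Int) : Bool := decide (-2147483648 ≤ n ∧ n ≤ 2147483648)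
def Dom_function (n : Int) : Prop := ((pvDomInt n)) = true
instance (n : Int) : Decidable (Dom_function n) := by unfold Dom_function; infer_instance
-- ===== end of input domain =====

-- B replaces A's triple nested loop by a closed-form product, an asymptotic speed-up.

-- ===== PORT A =====
-- 'while k <= n: counter += 1; k *= 2'; 'fuel' is only a totality device:
-- it strictly exceeds the loop's iteration count, so it never cuts the loop short.
def whileA (fuel : Nat) (k n c : Int) : Int :=
  match fuel with
  | 0 => c
  | fuel + 1 => if k ≤ n then whileA fuel (2 * k) n (c + 1) else c

def function (n : Int) : Int :=
  (PySem.List.pyRange (PySem.Int.floordiv n 2) (n + 1) 1).foldl (fun counter _i =>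
    (PySem.List.pyRange 1 (n - PySem.Int.floordiv n 2 + 1) 1).foldl (fun counter _j =>
      whileA (n.toNat + 1) 1 n counter) counter) 0

-- ===== PORT B =====
def function_alt (n : Int) : Int :=
  if n ≤ 0 then 0
  else
    let h := PySem.Int.floordiv (n + 1) 2
    (h + 1) * h * (PySem.Int.bitLength n : Int)

-- ===== PRECONDITION & SPEC =====
def Spec_function (n : Int) (out : Int) : Prop := out = function_alt n
instance (n : Int) (out : Int) : Decidable (Spec_function n out) := by unfold Spec_function; infer_instance

-- ===== CLAIM (what is proved, stated in full; the proofs are below) =====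
def Claim_equal_function : Prop := ∀ (n : Int), Dom_function n → Spec_function n (function n)

-- ===== LEMMAS AND PROOFS =====

theorem foldl_const_id {α : Type} (l : List α) (c : Int) :
    l.foldl (fun acc _ => acc) c = c := by
  induction l generalizing c with
  | nil => rfl
  | cons x xs ih => exact ih c

theorem whileA_nonpos (n : Int) (hn : n < 1) :
    ∀ (fuel : Nat) (c : Int), whileA fuel 1 n c = c := by
  intro fuel c
  cases fuel with
  | zero => rfl
  | succ fuel => simp [whileA]; omega

theorem whileA_eq (n : Int) (hn : 0 ≤ n) :
    ∀ (fuel : Nat) (k c : Int), 0 < k →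
      PySem.Int.bitLength (PySem.Int.floordiv n k) ≤ fuel →
      whileA fuel k n c = c + (PySem.Int.bitLength (PySem.Int.floordiv n k) : Int) := by
  intro fuel
  induction fuel with
  | zero =>
    intro k c hk hf
    have h0 : PySem.Int.bitLength (PySem.Int.floordiv n k) = 0 := by omega
    simp [whileA, h0]
  | succ fuel ih =>
    intro k c hk hf
    by_cases h2 : k ≤ n
    · have hk' : (0:Int) < k := hk
      have hq : (1:Int) ≤ PySem.Int.floordiv n k :=
        (PySem.Int.le_floordiv_iff_mul_le hk').mpr (by omega)
      have hstep : PySem.Int.bitLength (PySem.Int.floordiv n k)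
          = PySem.Int.bitLength (PySem.Int.floordiv n (2 * k)) + 1 := by
        rw [PySem.Int.bitLength_of_pos (by omega)]
        congr 2
        rw [PySem.Int.floordiv_eq_ediv_of_pos hk',
            PySem.Int.floordiv_eq_ediv_of_pos (by omega : (0:Int) < 2),
            PySem.Int.floordiv_eq_ediv_of_pos (by omega : (0:Int) < 2 * k),
            Int.ediv_ediv_of_nonneg (by omega : (0:Int) ≤ k)]
        ring_nf
      rw [whileA]
      simp only [if_pos h2]
      rw [ih (2 * k) (c + 1) (by omega) (by omega), hstep]
      push_cast; ring
    · rw [whileA]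
      simp only [if_neg h2]
      have hlt : PySem.Int.floordiv n k < 1 :=
        (PySem.Int.floordiv_lt_iff_lt_mul hk).mpr (by omega)
      have hge : 0 ≤ PySem.Int.floordiv n k := by
        rw [PySem.Int.floordiv_eq_ediv_of_pos hk]
        exact Int.ediv_nonneg hn (by omega)
      have h0 : PySem.Int.floordiv n k = 0 := by omega
      rw [h0]
      simp [PySem.Int.bitLength_zero]

theorem bitLength_le_self (n : Int) (hn : 0 < n) :
    PySem.Int.bitLength n ≤ n.toNat + 1 := by
  have h := PySem.Int.two_pow_bitLength_le n (by omega)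
  have h2 : PySem.Int.bitLength n - 1 < 2 ^ (PySem.Int.bitLength n - 1) :=
    Nat.lt_two_pow_self
  omega

theorem function_eq_closed (n : Int) : function n = function_alt n := by
  by_cases hn : n ≤ 0
  · -- while loop never runs: each loop body is the identity on the counter
    unfold function function_alt
    rw [if_pos hn]
    have hw : (fun (c : Int) (_j : Int) => whileA (n.toNat + 1) 1 n c) = fun c _j => c := by
      funext c j; exact whileA_nonpos n (by omega) _ c
    rw [hw]
    have hb : (fun (c : Int) (_i : Int) =>
        (PySem.List.pyRange 1 (n - PySem.Int.floordiv n 2 + 1) 1).foldl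
          (fun counter _j => counter) c) = fun c _i => c := by
      funext c i; exact foldl_const_id _ c
    rw [hb]
    exact foldl_const_id _ 0
  · have hn' : (0:Int) < n := by omega
    unfold function function_alt
    rw [if_neg (by omega)]
    set B : Int := (PySem.Int.bitLength n : Int) with hB
    have hd1 : PySem.Int.floordiv n 1 = n := by
      rw [PySem.Int.floordiv_eq_ediv_of_pos (by omega : (0:Int) < 1), Int.ediv_one]
    have hw : (fun (c : Int) (_j : Int) => whileA (n.toNat + 1) 1 n c) = fun c _j => c + B := by
      funext c j
      rw [whileA_eq n (by omega) (n.toNat + 1) 1 c (by omega)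
            (by rw [hd1]; exact bitLength_le_self n hn'), hd1]
    set innerLen : Int := ((n - PySem.Int.floordiv n 2 + 1 - 1).toNat : Int) with hIL
    have hinner : (fun (c : Int) (_i : Int) =>
        (PySem.List.pyRange 1 (n - PySem.Int.floordiv n 2 + 1) 1).foldl
          (fun counter _j => whileA (n.toNat + 1) 1 n counter) c) = fun c _i => c + innerLen * B := by
      funext c i
      rw [hw, PySem.List.foldl_add _ (fun _ => B),
          PySem.List.sum_map_const_int, PySem.List.length_pyRange_one]
    rw [hinner, PySem.List.foldl_add _ (fun _ => innerLen * B),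
        PySem.List.sum_map_const_int, PySem.List.length_pyRange_one]
    set outerLen : Int := ((n + 1 - PySem.Int.floordiv n 2).toNat : Int) with hOL
    have h2 : PySem.Int.floordiv n 2 = n / 2 :=
      PySem.Int.floordiv_eq_ediv_of_pos (by omega)
    have h2' : PySem.Int.floordiv (n + 1) 2 = (n + 1) / 2 :=
      PySem.Int.floordiv_eq_ediv_of_pos (by omega)
    have hIL' : innerLen = PySem.Int.floordiv (n + 1) 2 := by
      rw [hIL, h2, h2']; omega
    have hOL' : outerLen = PySem.Int.floordiv (n + 1) 2 + 1 := by
      rw [hOL, h2, h2']; omega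
    rw [hIL', hOL']; ring

-- ===== VERDICT (by name: the statement is the Claim_ definition above) =====
theorem function_spec : Claim_equal_function := by
  intro n _
  unfold Spec_function
  exact function_eq_closed n
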